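-- pv_equiv track=rewrite | github.com/isj0/Data-Structures-and-Algorithms | chapter_05/double_sum.py | double_then_sum
-- ===== SOURCE A (Python) =====
-- def double_then_sum(array):
--     doubled_array = []
--
--     for number in array:
--         doubled_array.append(number * 2)
--
--     sum = 0
--
--     for number in doubled_array:
--         sum += number
--
--     return sum
-- ===== SOURCE B (Python) =====
-- def double_then_sum(array):
--     return 2 * sum(array)
-- ===== Notes on version B (the rewrite author's own statement) =====
-- stated objective: simpler
-- what changed: Replaces the two loops (build a doubled list, then accumulate) with a single closed-form expression 2*sum(array), factoring the constant out of the sum and materializing no intermediate list.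
import Mathlib
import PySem

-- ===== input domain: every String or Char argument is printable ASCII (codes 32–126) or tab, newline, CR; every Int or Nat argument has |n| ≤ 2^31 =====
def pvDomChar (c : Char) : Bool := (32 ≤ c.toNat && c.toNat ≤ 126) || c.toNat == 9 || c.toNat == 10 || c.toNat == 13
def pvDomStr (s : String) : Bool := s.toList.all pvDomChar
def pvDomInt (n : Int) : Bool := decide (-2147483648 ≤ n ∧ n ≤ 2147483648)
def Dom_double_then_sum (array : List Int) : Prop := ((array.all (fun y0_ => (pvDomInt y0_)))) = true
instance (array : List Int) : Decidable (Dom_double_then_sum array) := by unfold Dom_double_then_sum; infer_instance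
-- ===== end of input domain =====

-- B replaces A's two loops (build a doubled list, then accumulate it) with the closed-form 2 * sum(array); objective: simpler.

-- ===== PORT A =====
-- first loop: build doubled_array by appending number * 2
-- second loop: accumulate sum over doubled_array
def double_then_sum (array : List Int) : Int :=
  let doubled_array := array.foldl (fun acc number => acc ++ [number * 2]) []
  doubled_array.foldl (fun sum number => sum + number) 0

-- ===== PORT B =====
def double_then_sum_alt (array : List Int) : Int :=
  2 * array.sum

-- ===== PRECONDITION & SPEC =====
def Spec_double_then_sum (array : List Int) (out : Int) : Prop := out = double_then_sum_alt array
instance (array : List Int) (out : Int) : Decidable (Spec_double_then_sum array out) := by unfold Spec_double_then_sum; infer_instance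

-- ===== CLAIM (what is proved, stated in full; the proofs are below) =====
def Claim_equal_double_then_sum : Prop := ∀ (array : List Int), Dom_double_then_sum array → Spec_double_then_sum array (double_then_sum array)

-- ===== LEMMAS AND PROOFS =====
theorem pv_build_doubled (array : List Int) (acc : List Int) :
    array.foldl (fun acc number => acc ++ [number * 2]) acc = acc ++ array.map (· * 2) := by
  induction array generalizing acc with
  | nil => simp [List.foldl]
  | cons x xs ih => simp [List.foldl, ih]

theorem pv_sum_foldl (xs : List Int) (s : Int) :
    xs.foldl (fun sum number => sum + number) s = s + xs.sum := by
  induction xs generalizing s with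
  | nil => simp [List.foldl]
  | cons x xs ih => simp [List.foldl, ih]; ring

-- ===== VERDICT (by name: the statement is the Claim_ definition above) =====
theorem double_then_sum_spec : Claim_equal_double_then_sum := by
  intro array _
  unfold Spec_double_then_sum double_then_sum double_then_sum_alt
  rw [pv_build_doubled, pv_sum_foldl]
  simp [List.sum_map_mul_right, mul_comm]
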